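-- pv_equiv track=rewrite | github.com/jdfinch/structpy | trash/HtmlGen.py | RemoveOuterSymbols
-- ===== SOURCE A (Python) =====
-- def RemoveOuterSymbols(string):
--     valid = set('abcdefghijklmnopqrstuvwxyzABCDEFGHIJKLMNOPQRSTUVWXYZ0123456789_')
--     i = 0
--     while i < len(string) and string[i] not in valid:
--         i += 1
--     j = len(string) - 1
--     while j > -1 and string[j] not in valid:
--         j -= 1
--     return string[i:j+1]
-- ===== SOURCE B (Python) =====
-- _WORD = set('abcdefghijklmnopqrstuvwxyzABCDEFGHIJKLMNOPQRSTUVWXYZ0123456789_')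
--
-- def _drop_leading(cs):
--     # return the suffix starting at the first word character (empty if none)
--     for k, c in enumerate(cs):
--         if c in _WORD:
--             return cs[k:]
--     return []
--
-- def RemoveOuterSymbols(string):
--     cs = _drop_leading(list(string))
--     cs = _drop_leading(cs[::-1])
--     return ''.join(cs[::-1])
-- ===== Notes on version B (the rewrite author's own statement) =====
-- stated objective: alternative
-- what changed: Replaces the two index-pointer while loops plus a slice with a strip-leading-run pass applied twice around a reversal (dropwhile on the list, reverse, dropwhile, reverse).
import Mathlib
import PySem

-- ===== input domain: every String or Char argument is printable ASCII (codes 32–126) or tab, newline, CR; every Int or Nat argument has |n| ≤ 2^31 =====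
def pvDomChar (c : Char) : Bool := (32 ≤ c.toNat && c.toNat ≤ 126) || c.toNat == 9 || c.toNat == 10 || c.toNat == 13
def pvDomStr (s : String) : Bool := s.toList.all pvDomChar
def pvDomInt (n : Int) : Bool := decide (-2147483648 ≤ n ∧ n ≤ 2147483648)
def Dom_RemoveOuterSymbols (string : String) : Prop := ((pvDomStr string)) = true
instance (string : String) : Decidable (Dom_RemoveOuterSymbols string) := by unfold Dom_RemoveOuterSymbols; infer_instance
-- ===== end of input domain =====

-- B replaces A's two index-pointer scans plus a slice by stripping the leading
-- non-word run from the list and, after a reversal, stripping it again (alternative decomposition).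


-- ===== PORT A =====
-- the literal `valid` character set A builds (B's module constant `_WORD` is the same set)
def pvValidChars : List Char :=
  "abcdefghijklmnopqrstuvwxyzABCDEFGHIJKLMNOPQRSTUVWXYZ0123456789_".toList

def pvValid : PySem.Set Char := PySem.Set.ofList pvValidChars

-- `while i < len(string) and string[i] not in valid: i += 1`
def pvScanFwd (l : List Char) (i : Nat) : Nat :=
  if h : i < l.length then
    if PySem.Set.contains pvValid l[i] then i else pvScanFwd l (i + 1)
  else i
termination_by l.length - i

-- `while j > -1 and string[j] not in valid: j -= 1`
-- (the `.getD ' '` default is never reached: the caller starts at len-1 and only decrements)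
def pvScanBwd (l : List Char) (j : Int) : Int :=
  if _h : -1 < j then
    if PySem.Set.contains pvValid ((PySem.List.pyGet? l j).getD ' ') then j
    else pvScanBwd l (j - 1)
  else j
termination_by (j + 1).toNat

def RemoveOuterSymbols (string : String) : String :=
  let l := string.toList
  let i : Nat := pvScanFwd l 0
  let j : Int := pvScanBwd l ((l.length : Int) - 1)
  String.ofList (PySem.List.slice l (some (i : Int)) (some (j + 1)))

-- ===== PORT B =====
-- `_drop_leading(cs)`: the suffix starting at the first word character, [] if none
def pvDropLeading (cs : List Char) : List Char :=
  match cs with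
  | [] => []
  | c :: rest => if PySem.Set.contains pvValid c then c :: rest else pvDropLeading rest

def RemoveOuterSymbols_alt (string : String) : String :=
  String.ofList ((pvDropLeading ((pvDropLeading string.toList).reverse)).reverse)

-- ===== PRECONDITION & SPEC =====
def Spec_RemoveOuterSymbols (string : String) (out : String) : Prop := out = RemoveOuterSymbols_alt string
instance (string : String) (out : String) : Decidable (Spec_RemoveOuterSymbols string out) := by unfold Spec_RemoveOuterSymbols; infer_instance

-- ===== CLAIM (what is proved, stated in full; the proofs are below) =====
def Claim_equal_RemoveOuterSymbols : Prop := ∀ (string : String), Dom_RemoveOuterSymbols string → Spec_RemoveOuterSymbols string (RemoveOuterSymbols string)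

-- ===== LEMMAS AND PROOFS =====

-- the "non-word" predicate both loops test
def pvP (c : Char) : Bool := !PySem.Set.contains pvValid c

theorem pvDropLeading_eq (cs : List Char) : pvDropLeading cs = cs.dropWhile pvP := by
  induction cs with
  | nil => rfl
  | cons c rest ih =>
    unfold pvDropLeading
    by_cases hc : c ∈ pvValid <;>
      simp [pvP, hc, ih]

theorem pv_tw_len_le (p : Char → Bool) (l : List Char) :
    (l.takeWhile p).length ≤ l.length := by
  induction l with
  | nil => simp
  | cons c rest ih =>
    by_cases hc : p c = true
    · simp [hc]; omega
    · simp only [Bool.not_eq_true] at hc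
      simp [hc]

theorem pv_tw_lt (p : Char → Bool) (l : List Char) (h : ∃ x ∈ l, p x = false) :
    (l.takeWhile p).length < l.length := by
  induction l with
  | nil => simp at h
  | cons c rest ih =>
    by_cases hc : p c = true
    · have : ∃ x ∈ rest, p x = false := by
        obtain ⟨x, hx, hpx⟩ := h
        rcases List.mem_cons.mp hx with rfl | hx'
        · simp [hc] at hpx
        · exact ⟨x, hx', hpx⟩
      simp only [List.takeWhile_cons, hc, if_pos]
      simpa using Nat.succ_lt_succ (ih this)
    · simp only [Bool.not_eq_true] at hc
      simp [List.takeWhile_cons, hc]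

theorem pv_tw_append (p : Char → Bool) (xs ys : List Char) (h : ∃ x ∈ xs, p x = false) :
    (xs ++ ys).takeWhile p = xs.takeWhile p := by
  induction xs with
  | nil => simp at h
  | cons c rest ih =>
    by_cases hc : p c = true
    · have : ∃ x ∈ rest, p x = false := by
        obtain ⟨x, hx, hpx⟩ := h
        rcases List.mem_cons.mp hx with rfl | hx'
        · simp [hc] at hpx
        · exact ⟨x, hx', hpx⟩
      simp [hc, ih this]
    · simp only [Bool.not_eq_true] at hc
      simp [List.takeWhile_cons, hc]

theorem pv_tw_take (p : Char → Bool) (xs : List Char) (m : Nat)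
    (h : (xs.takeWhile p).length < m) : (xs.take m).takeWhile p = xs.takeWhile p := by
  induction xs generalizing m with
  | nil => simp
  | cons c rest ih =>
    cases m with
    | zero => omega
    | succ m' =>
      by_cases hc : p c = true
      · have h' : (rest.takeWhile p).length < m' := by
          simp [hc] at h; omega
        simp [hc, ih m' h']
      · simp only [Bool.not_eq_true] at hc
        simp [hc]

theorem pv_dw_eq_drop (p : Char → Bool) (xs : List Char) :
    xs.dropWhile p = xs.drop (xs.takeWhile p).length := by
  induction xs with
  | nil => rfl
  | cons c rest ih =>
    by_cases hc : p c = true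
    · simp [List.dropWhile_cons, hc, ih]
    · simp only [Bool.not_eq_true] at hc
      simp [List.dropWhile_cons, hc]

theorem pvScanFwd_spec : ∀ (n : Nat) (l : List Char) (i : Nat), l.length - i = n → i ≤ l.length →
    pvScanFwd l i = i + ((l.drop i).takeWhile pvP).length := by
  intro n
  induction n with
  | zero =>
    intro l i h hi
    have hil : i = l.length := by omega
    unfold pvScanFwd
    rw [dif_neg (by omega)]
    subst hil
    simp
  | succ n ih =>
    intro l i h hi
    have hlt : i < l.length := by omega
    unfold pvScanFwd
    rw [dif_pos hlt, List.drop_eq_getElem_cons hlt]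
    by_cases hc : PySem.Set.contains pvValid l[i] = true
    · rw [if_pos hc]
      simp at hc
      simp [pvP, hc]
    · rw [if_neg hc, ih l (i + 1) (by omega) (by omega)]
      simp at hc
      have hp : pvP l[i] = true := by simp [pvP, hc]
      rw [List.takeWhile_cons, if_pos hp]
      simp only [List.length_cons]
      omega

theorem pvScanBwd_spec : ∀ (k : Nat) (l : List Char), k ≤ l.length →
    pvScanBwd l ((k : Int) - 1) = (k : Int) - 1 - (((l.take k).reverse.takeWhile pvP).length : Int) := by
  intro k
  induction k with
  | zero =>
    intro l _
    unfold pvScanBwd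
    rw [dif_neg (by omega)]
    simp
  | succ k ih =>
    intro l hk
    have hlt : k < l.length := by omega
    have hj : ((k : Int) + 1) - 1 = (k : Int) := by ring
    have hget : PySem.List.pyGet? l ((k : Int) + 1 - 1) = some l[k] := by
      rw [hj, PySem.List.pyGet?_natCast, List.getElem?_eq_getElem hlt]
    have htake : (l.take (k + 1)).reverse = l[k] :: (l.take k).reverse := by
      rw [List.take_add_one, List.getElem?_eq_getElem hlt]
      simp
    unfold pvScanBwd
    push_cast
    rw [dif_pos (by omega)]
    rw [show ((k : Int) + 1 - 1) = (k : Int) from by ring] at hget ⊢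
    rw [show PySem.List.pyGet? l (k : Int) = some l[k] from by
      rw [PySem.List.pyGet?_natCast, List.getElem?_eq_getElem hlt]]
    simp only [Option.getD_some]
    by_cases hc : PySem.Set.contains pvValid l[k] = true
    · rw [if_pos hc, htake]
      simp at hc
      simp [pvP, hc]
    · rw [if_neg hc]
      rw [ih l (by omega)]
      rw [htake]
      simp at hc
      simp [pvP, hc]
      ring

-- the core list identity: A's slice equals B's double strip-and-reverse
theorem pv_main (l : List Char) :
    PySem.List.slice l (some ((pvScanFwd l 0 : Nat) : Int)) (some (pvScanBwd l ((l.length : Int) - 1) + 1))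
      = (pvDropLeading ((pvDropLeading l).reverse)).reverse := by
  set n := l.length with hn
  set i := (l.takeWhile pvP).length with hi
  set r := (l.reverse.takeWhile pvP).length with hr
  have hfwd : pvScanFwd l 0 = i := by
    rw [pvScanFwd_spec (l.length - 0) l 0 rfl (by omega)]; simp [hi]
  have hbwd : pvScanBwd l ((l.length : Int) - 1) = (n : Int) - 1 - (r : Int) := by
    have := pvScanBwd_spec n l (by omega)
    rw [List.take_length] at this  -- take n l = l
    simpa [hn, hr] using this
  have hile : i ≤ n := pv_tw_len_le pvP l
  have hrle : r ≤ n := by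
    have := pv_tw_len_le pvP l.reverse
    simpa [hn] using this
  have hslice : PySem.List.slice l (some ((pvScanFwd l 0 : Nat) : Int)) (some (pvScanBwd l ((l.length : Int) - 1) + 1))
      = (l.drop i).take (n - r - i) := by
    rw [hfwd, hbwd]
    have hb : (n : Int) - 1 - (r : Int) + 1 = ((n - r : Nat) : Int) := by push_cast [Nat.cast_sub hrle]; ring
    rw [hb]
    rw [PySem.List.slice_natCast]
  rw [hslice, pvDropLeading_eq, pvDropLeading_eq]
  by_cases hall : l.dropWhile pvP = []
  · have hall' : ∀ x ∈ l, pvP x = true := List.dropWhile_eq_nil_iff.mp hall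
    have hii : i = n := by
      rw [hi, List.takeWhile_eq_self_iff.mpr hall', hn]
    rw [hall]
    simp [hii]
  · -- some word character exists
    have hex : ∃ x ∈ l, pvP x = false := by
      by_contra hno
      push Not at hno
      exact hall (List.dropWhile_eq_nil_iff.mpr (by
        intro x hx
        cases h : pvP x
        · exact absurd h (hno x hx)
        · rfl))
    have hilt : i < n := pv_tw_lt pvP l hex
    have f1 : l.dropWhile pvP = l.drop i := pv_dw_eq_drop pvP l
    -- the word character sits in the dropped suffix
    have hex' : ∃ y ∈ l.drop i, pvP y = false := by
      obtain ⟨x, hx, hpx⟩ := hex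
      refine ⟨x, ?_, hpx⟩
      have hsplit : l.takeWhile pvP ++ l.dropWhile pvP = l := List.takeWhile_append_dropWhile
      rw [← hsplit] at hx
      rcases List.mem_append.mp hx with h1 | h2
      · have := List.mem_takeWhile_imp h1
        rw [this] at hpx; exact absurd hpx (by simp)
      · rwa [f1] at h2
    have hexrev : ∃ y ∈ (l.drop i).reverse, pvP y = false := by
      obtain ⟨y, hy, hpy⟩ := hex'
      exact ⟨y, List.mem_reverse.mpr hy, hpy⟩
    have hrevsplit : l.reverse = (l.drop i).reverse ++ (l.take i).reverse := by
      rw [← List.reverse_append, List.take_append_drop]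
    have htwrev : l.reverse.takeWhile pvP = ((l.drop i).reverse).takeWhile pvP := by
      rw [hrevsplit]
      exact pv_tw_append pvP _ _ hexrev
    have hrlt : r < n - i := by
      have h1 := pv_tw_lt pvP ((l.drop i).reverse) hexrev
      rw [hr, htwrev]
      simpa [hn] using h1
    -- B-side chain
    rw [f1]
    have s1 : (l.drop i).reverse = l.reverse.take (n - i) := by
      rw [List.reverse_drop, hn]
    rw [s1]
    have s2 : (l.reverse.take (n - i)).takeWhile pvP = l.reverse.takeWhile pvP :=
      pv_tw_take pvP l.reverse (n - i) (by rw [← hr]; exact hrlt)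
    have s3 : (l.reverse.take (n - i)).dropWhile pvP = (l.reverse.take (n - i)).drop r := by
      rw [pv_dw_eq_drop, s2, ← hr]
    rw [s3, List.drop_take]
    have s4 : l.reverse.drop r = (l.take (n - r)).reverse := by
      rw [List.reverse_take, hn]
      congr 1
      omega
    rw [s4]
    have s5 : ((l.take (n - r)).reverse).take (n - i - r) = (List.drop i (l.take (n - r))).reverse := by
      rw [List.reverse_drop]
      congr 1
      simp [hn]
      omega
    rw [s5, List.reverse_reverse, List.drop_take]

-- ===== VERDICT (by name: the statement is the Claim_ definition above) =====
theorem RemoveOuterSymbols_spec : Claim_equal_RemoveOuterSymbols := by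
  intro string _
  unfold Spec_RemoveOuterSymbols RemoveOuterSymbols RemoveOuterSymbols_alt
  exact congrArg String.ofList (pv_main string.toList)
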